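-- pv_equiv track=rewrite | github.com/chapayM/algorytms | Lesson3/Les3Task5.py | max_negative_number1
-- ===== SOURCE A (Python) =====
-- def max_negative_number1(array):
--     sort_array = sorted(list(set(array.copy())))
--     el = 0
--     while True:
--         try:
--             if sort_array.index(el)>=0:
--                 return f'Максимальное отрицательное чилов {sort_array[sort_array.index(el)-1]} расположено на ' \
--                        f'{array.index(sort_array[sort_array.index(el)-1])} месте в массиве.'
--         except ValueError:
--             el += 1
-- ===== SOURCE B (Python) =====
-- def max_negative_number1(array):
--     best = None      # maximum negative element seen so far
--     best_i = 0
--     top = None       # maximum nonnegative element seen so far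
--     top_i = 0
--     for i, x in enumerate(array):
--         if x < 0:
--             if best is None or x > best:
--                 best, best_i = x, i
--         elif top is None or x > top:
--             top, top_i = x, i
--     # A reports the overall maximum when the array holds no negative number
--     value, index = (best, best_i) if best is not None else (top, top_i)
--     return (f'Максимальное отрицательное чилов {value} расположено на '
--             f'{index} месте в массиве.')
-- ===== Notes on version B (the rewrite author's own statement) =====
-- stated objective: alternative
-- what changed: Replaces A's sort-unique plus a while loop that probes el=0,1,2,... with repeated list.index scans by a single linear pass tracking the maximum negative element (and the overall maximum, which A reports when no negative exists) together with its first index.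
import Mathlib
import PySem

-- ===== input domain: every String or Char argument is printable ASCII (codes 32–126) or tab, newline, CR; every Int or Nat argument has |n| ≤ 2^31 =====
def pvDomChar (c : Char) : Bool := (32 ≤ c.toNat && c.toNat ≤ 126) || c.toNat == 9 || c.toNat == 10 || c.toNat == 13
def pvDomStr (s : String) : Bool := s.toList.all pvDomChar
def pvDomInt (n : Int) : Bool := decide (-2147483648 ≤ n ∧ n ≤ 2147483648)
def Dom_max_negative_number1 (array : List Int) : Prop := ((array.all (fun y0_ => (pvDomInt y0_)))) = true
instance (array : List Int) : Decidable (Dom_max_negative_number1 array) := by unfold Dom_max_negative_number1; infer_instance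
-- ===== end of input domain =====

-- B replaces A's sort-unique + while loop probing el = 0,1,2,… (each probe a list.index scan)
-- by one linear pass tracking the maximum negative (and overall maximum) element and its first
-- index (objective: alternative).

-- ===== PORT A =====
-- the f-string of the return statement (identical text in A and B)
def pvMsg (v : Int) (j : Int) : String :=
  "Максимальное отрицательное чилов " ++ PySem.Int.toStr v ++ " расположено на "
    ++ PySem.Int.toStr j ++ " месте в массиве."

-- one execution of the try-block body; none = a ValueError was raised and caught (→ el += 1)
def pvTryBody (array sort_array : List Int) (el : Int) : Option String :=
  match PySem.List.index? sort_array el with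
  | none => none                                   -- sort_array.index(el) raises ValueError
  | some idx =>
    if (idx : Int) ≥ 0 then                        -- 'if sort_array.index(el)>=0' (a Nat index: always true)
      -- sort_array[sort_array.index(el)-1]; idx-1 = -1 wraps to the last element, as in Python
      let v := (PySem.List.pyGet? sort_array ((idx : Int) - 1)).getD 0
      match PySem.List.index? array v with
      | none => none                               -- array.index(v) raises ValueError (never happens: v ∈ array)
      | some j => some (pvMsg v (j : Int))
    else none

-- 'while True': fuel-bounded recursion; fuel 2^31+2 suffices whenever Python returns on Dom
-- (the smallest nonnegative element present is ≤ 2^31); "" = Python diverges (outside Pre_)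
def pvWhile (array sort_array : List Int) : Nat → Int → String
  | 0, _ => ""
  | fuel + 1, el =>
    match pvTryBody array sort_array el with
    | some s => s
    | none => pvWhile array sort_array fuel (el + 1)

def max_negative_number1 (array : List Int) : String :=
  let sort_array := PySem.List.sorted (PySem.Set.ofList array) (fun x => x) false
  pvWhile array sort_array (2 ^ 31 + 2) 0

-- ===== PORT B =====
-- one iteration of B's for loop over (best, top): best = maximal negative seen, top = maximal
-- nonnegative seen, each with the index of its first occurrence
def pvStep (acc : Option (Int × Int) × Option (Int × Int)) (p : Int × Int) :
    Option (Int × Int) × Option (Int × Int) :=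
  if p.2 < 0 then
    (match acc.1 with
     | none => some (p.2, p.1)
     | some (b, bi) => if b < p.2 then some (p.2, p.1) else some (b, bi),
     acc.2)
  else
    (acc.1,
     match acc.2 with
     | none => some (p.2, p.1)
     | some (t, ti) => if t < p.2 then some (p.2, p.1) else some (t, ti))

def max_negative_number1_alt (array : List Int) : String :=
  match (PySem.List.enumerate array 0).foldl pvStep (none, none) with
  | (some (b, bi), _) =>
      "Максимальное отрицательное чилов " ++ PySem.Int.toStr b ++ " расположено на "
        ++ PySem.Int.toStr bi ++ " месте в массиве."
  | (none, some (t, ti)) =>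
      "Максимальное отрицательное чилов " ++ PySem.Int.toStr t ++ " расположено на "
        ++ PySem.Int.toStr ti ++ " месте в массиве."
  | (none, none) =>      -- empty/no-element case: Python prints value None, index 0 (outside Pre_)
      "Максимальное отрицательное чилов None расположено на 0 месте в массиве."

-- ===== PRECONDITION & SPEC =====
-- Pre_ excludes exactly the inputs (no nonnegative element, incl. the empty list) on which A's
-- while loop never finds el and DIVERGES; B returns its normal answer there.
def Pre_max_negative_number1 (array : List Int) : Prop := (array.any (fun x => 0 ≤ x)) = true
instance (array : List Int) : Decidable (Pre_max_negative_number1 array) := by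
  unfold Pre_max_negative_number1; infer_instance
def pvWitness_max_negative_number1 : List Int := [3, -5, 7, -2, -9, 0]

def Spec_max_negative_number1 (array : List Int) (out : String) : Prop :=
  out = max_negative_number1_alt array
instance (array : List Int) (out : String) : Decidable (Spec_max_negative_number1 array out) := by
  unfold Spec_max_negative_number1; infer_instance

-- ===== CLAIM (what is proved, stated in full; the proofs are below) =====
def Claim_equal_max_negative_number1 : Prop := ∀ (array : List Int), Dom_max_negative_number1 array → Pre_max_negative_number1 array → Spec_max_negative_number1 array (max_negative_number1 array)

-- ===== LEMMAS AND PROOFS =====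

-- A's sorted unique list, the position of its first nonnegative element, and the value
-- A extracts at position k-1 (proof-only helpers; the ports do not use them)
def pvS (array : List Int) : List Int :=
  PySem.List.sorted (PySem.Set.ofList array) (fun x => x) false

def pvK (array : List Int) : Nat := (pvS array).findIdx (fun x => decide (0 ≤ x))

def pvV (array : List Int) : Int :=
  (PySem.List.pyGet? (pvS array) ((pvK array : Int) - 1)).getD 0

lemma mem_pvS (array : List Int) (x : Int) : x ∈ pvS array ↔ x ∈ array := by
  rw [pvS, PySem.List.mem_sorted, PySem.Set.mem_ofList]

lemma pvS_lt (array : List Int) {i j : Nat} (hij : i < j) (hj : j < (pvS array).length) :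
    (pvS array)[i]'(by omega) < (pvS array)[j] := by
  have h := PySem.List.sorted_ofList_pairwise_lt (κ := Int) array
  rw [List.pairwise_iff_getElem] at h
  exact h i j (lt_trans hij hj) hj hij

-- a strictly increasing list: index? of the k-th element is k
lemma pvS_index? (array : List Int) (k : Nat) (hk : k < (pvS array).length) :
    PySem.List.index? (pvS array) ((pvS array)[k]) = some k := by
  rw [PySem.List.index?_eq_some_iff]
  refine ⟨(pvS array).take k, (pvS array).drop (k + 1), ?_, by simp; omega, ?_⟩
  · rw [List.getElem_cons_drop, List.take_append_drop]
  · intro hmem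
    obtain ⟨j, hj, hje⟩ := List.getElem_of_mem hmem
    have hjk : j < k := by simp at hj; omega
    rw [List.getElem_take] at hje
    have hlt := pvS_lt array hjk hk
    rw [hje] at hlt
    exact lt_irrefl _ hlt

lemma pvS_le (array : List Int) {i j : Nat} (hij : i ≤ j) (hj : j < (pvS array).length) :
    (pvS array)[i]'(by omega) ≤ (pvS array)[j] := by
  rcases eq_or_lt_of_le hij with h | h
  · subst h; exact le_refl _
  · exact le_of_lt (pvS_lt array h hj)

lemma pvK_lt (array : List Int) (hpre : Pre_max_negative_number1 array) :
    pvK array < (pvS array).length := by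
  rw [Pre_max_negative_number1, List.any_eq_true] at hpre
  obtain ⟨x, hx, h0⟩ := hpre
  exact List.findIdx_lt_length.mpr ⟨x, (mem_pvS array x).mpr hx, h0⟩

lemma pvK_nonneg (array : List Int) (hk : pvK array < (pvS array).length) :
    0 ≤ (pvS array)[pvK array] := by
  have := List.findIdx_getElem (w := hk)
  simpa [pvK] using this

lemma pvK_before (array : List Int) (j : Nat) (hj : j < (pvS array).length)
    (hjk : j < pvK array) : (pvS array)[j] < 0 := by
  have := List.not_of_lt_findIdx (xs := pvS array) (p := fun x => decide (0 ≤ x)) (by simpa [pvK] using hjk)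
  simp only [decide_eq_false_iff_not, not_le] at this
  simpa using this

-- nothing of the sorted unique list lies in [0, S[k]): S[k] is the least nonnegative present
lemma pvK_gap (array : List Int) (hk : pvK array < (pvS array).length)
    (e : Int) (h0 : 0 ≤ e) (hlt : e < (pvS array)[pvK array]) : e ∉ pvS array := by
  intro hmem
  obtain ⟨i, hi, hie⟩ := List.getElem_of_mem hmem
  rcases lt_trichotomy i (pvK array) with h | h | h
  · have := pvK_before array i hi h
    omega
  · subst h; omega
  · have := pvS_lt array h hi
    omega

-- the while loop returns the value of the try-body at the least el whose probe succeeds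
lemma pvWhile_reach (array S : List Int) (m : Int)
    (hgap : ∀ e : Int, 0 ≤ e → e < m → e ∉ S)
    (s : String) (hbody : pvTryBody array S m = some s) :
    ∀ (fuel : Nat) (el : Int), 0 ≤ el → el ≤ m → (m - el).toNat < fuel →
      pvWhile array S fuel el = s := by
  intro fuel
  induction fuel with
  | zero => intro el _ _ h; omega
  | succ f ih =>
    intro el h0 hle hf
    by_cases heq : el = m
    · subst heq
      simp [pvWhile, hbody]
    · have hlt : el < m := lt_of_le_of_ne hle heq
      have hnm : el ∉ S := hgap el h0 hlt
      have hni : PySem.List.index? S el = none := (PySem.List.index?_eq_none_iff S el).mpr hnm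
      simp only [pvWhile, pvTryBody, hni]
      exact ih (el + 1) (by omega) (by omega) (by omega)

-- under Dom and Pre, A returns the message about pvV and its first index in array
lemma A_run (array : List Int) (hdom : Dom_max_negative_number1 array)
    (hpre : Pre_max_negative_number1 array) :
    ∃ j : Nat, PySem.List.index? array (pvV array) = some j ∧
      pvV array ∈ array ∧ max_negative_number1 array = pvMsg (pvV array) (j : Int) := by
  have hk := pvK_lt array hpre
  have hmS : (pvS array)[pvK array] ∈ pvS array := List.getElem_mem hk
  -- pvV ∈ pvS array (whether k = 0, wrapping to the last element, or k ≥ 1)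
  have hvS : pvV array ∈ pvS array := by
    rcases Nat.eq_zero_or_pos (pvK array) with h0 | hpos
    · rw [pvV, h0]
      norm_num [PySem.List.pyGet?_neg_one]
      cases hgl : (pvS array).getLast? with
      | none => rw [List.getLast?_eq_none_iff] at hgl; simp [hgl] at hk
      | some g => simpa using List.mem_of_getLast? hgl
    · have hcast : ((pvK array : Int) - 1) = ((pvK array - 1 : Nat) : Int) := by push_cast [hpos]; ring
      rw [pvV, hcast, PySem.List.pyGet?_natCast]
      have hlt : pvK array - 1 < (pvS array).length := by omega
      rw [List.getElem?_eq_getElem hlt]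
      exact List.getElem_mem hlt
  have hva : pvV array ∈ array := (mem_pvS array _).mp hvS
  obtain ⟨j, hj⟩ := Option.isSome_iff_exists.mp ((PySem.List.index?_isSome_iff array (pvV array)).mpr hva)
  refine ⟨j, hj, hva, ?_⟩
  have hbody : pvTryBody array (pvS array) ((pvS array)[pvK array]) = some (pvMsg (pvV array) (j : Int)) := by
    rw [pvTryBody, pvS_index? array (pvK array) hk]
    simp only [Int.natCast_nonneg, if_pos, ge_iff_le]
    rw [show ((PySem.List.pyGet? (pvS array) ((pvK array : Int) - 1)).getD 0) = pvV array from rfl, hj]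
  have hmdom : (pvS array)[pvK array] ≤ 2147483648 := by
    have : (pvS array)[pvK array] ∈ array := (mem_pvS array _).mp hmS
    rw [Dom_max_negative_number1, List.all_eq_true] at hdom
    have := hdom _ this
    simp [pvDomInt] at this
    omega
  have := pvWhile_reach array (pvS array) ((pvS array)[pvK array])
    (pvK_gap array hk) _ hbody (2 ^ 31 + 2) 0 le_rfl (pvK_nonneg array hk) (by omega)
  rw [max_negative_number1]
  exact this

-- if array has a negative element, pvV is its maximal negative element
lemma A_neg (array : List Int) (hpre : Pre_max_negative_number1 array)
    (y : Int) (hy : y ∈ array) (hy0 : y < 0) :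
    pvV array < 0 ∧ ∀ x ∈ array, x < 0 → x ≤ pvV array := by
  have hk := pvK_lt array hpre
  -- every negative member of array sits strictly before position k in pvS
  have hidxneg : ∀ x ∈ array, x < 0 → ∃ i, ∃ h : i < (pvS array).length, i < pvK array ∧ (pvS array)[i] = x := by
    intro x hx hx0
    obtain ⟨i, hi, hie⟩ := List.getElem_of_mem ((mem_pvS array x).mpr hx)
    refine ⟨i, hi, ?_, hie⟩
    by_contra h
    push_neg at h
    have h1 := pvS_le array h hi
    have h2 := pvK_nonneg array hk
    rw [hie] at h1
    omega
  obtain ⟨i, hi, hik, hie⟩ := hidxneg y hy hy0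
  have hpos : 0 < pvK array := by omega
  have hcast : ((pvK array : Int) - 1) = ((pvK array - 1 : Nat) : Int) := by push_cast [hpos]; ring
  have hk1 : pvK array - 1 < (pvS array).length := by omega
  have hveq : pvV array = (pvS array)[pvK array - 1] := by
    rw [pvV, hcast, PySem.List.pyGet?_natCast, List.getElem?_eq_getElem hk1]
    rfl
  constructor
  · rw [hveq]; exact pvK_before array _ hk1 (by omega)
  · intro x hx hx0
    obtain ⟨i', hi', hik', hie'⟩ := hidxneg x hx hx0
    rw [hveq, ← hie']
    exact pvS_le array (Nat.le_sub_one_of_lt hik') hk1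

-- if array has no negative element, pvV (A wraps to sort_array[-1]) is the maximal element
lemma A_pos (array : List Int) (hpre : Pre_max_negative_number1 array)
    (hall : ∀ x ∈ array, 0 ≤ x) :
    0 ≤ pvV array ∧ ∀ x ∈ array, x ≤ pvV array := by
  have hk := pvK_lt array hpre
  have hk0 : pvK array = 0 := by
    by_contra h
    have h1 := pvK_before array 0 (by omega) (by omega)
    have h2 := hall _ ((mem_pvS array _).mp (List.getElem_mem (show 0 < (pvS array).length by omega)))
    omega
  have hne : pvS array ≠ [] := List.ne_nil_of_length_pos (by omega)
  have hveq : pvV array = (pvS array)[(pvS array).length - 1]'(by omega) := by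
    rw [pvV, hk0]
    norm_num [PySem.List.pyGet?_neg_one]
    rw [List.getLast?_eq_some_getLast hne, Option.getD_some, List.getLast_eq_getElem]
  constructor
  · rw [hveq]; exact hall _ ((mem_pvS array _).mp (List.getElem_mem _))
  · intro x hx
    obtain ⟨i, hi, hie⟩ := List.getElem_of_mem ((mem_pvS array x).mpr hx)
    rw [hveq, ← hie]
    exact pvS_le array (by omega) (by omega)

-- the two components of B's fold state evolve independently
def pvStepNeg (a : Option (Int × Int)) (p : Int × Int) : Option (Int × Int) :=
  if p.2 < 0 then
    match a with
    | none => some (p.2, p.1)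
    | some (b, bi) => if b < p.2 then some (p.2, p.1) else some (b, bi)
  else a

def pvStepTop (a : Option (Int × Int)) (p : Int × Int) : Option (Int × Int) :=
  if p.2 < 0 then a
  else
    match a with
    | none => some (p.2, p.1)
    | some (t, ti) => if t < p.2 then some (p.2, p.1) else some (t, ti)

lemma pvStep_eq (acc : Option (Int × Int) × Option (Int × Int)) (p : Int × Int) :
    pvStep acc p = (pvStepNeg acc.1 p, pvStepTop acc.2 p) := by
  rcases acc with ⟨a, b⟩
  by_cases h : p.2 < 0 <;> simp [pvStep, pvStepNeg, pvStepTop, h]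

lemma foldl_pvStep (l : List (Int × Int)) (a b : Option (Int × Int)) :
    l.foldl pvStep (a, b) = (l.foldl pvStepNeg a, l.foldl pvStepTop b) := by
  induction l generalizing a b with
  | nil => rfl
  | cons x xs ih => rw [List.foldl_cons, List.foldl_cons, List.foldl_cons, pvStep_eq]; exact ih _ _

-- B's negative track: none iff no negative element; else the maximal negative and its first index
lemma B_neg (array : List Int) :
    ((∀ x ∈ array, 0 ≤ x) ∧ (PySem.List.enumerate array 0).foldl pvStepNeg none = none) ∨
    (∃ (v : Int) (j : Nat), (PySem.List.enumerate array 0).foldl pvStepNeg none = some (v, (j : Int)) ∧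
      v ∈ array ∧ v < 0 ∧ (∀ x ∈ array, x < 0 → x ≤ v) ∧
      PySem.List.index? array v = some j) := by
  induction array using List.reverseRecOn with
  | nil => left; simp [PySem.List.enumerate_nil]
  | append_singleton xs x ih =>
    rw [PySem.List.enumerate_append, List.foldl_append]
    have hsing : PySem.List.enumerate [x] ((0 : Int) + xs.length) = [((xs.length : Int), x)] := by
      simp [PySem.List.enumerate_cons, PySem.List.enumerate_nil]
    rw [hsing]
    rcases ih with ⟨hall, hnone⟩ | ⟨v, j, hfold, hvm, hv0, hvmax, hvi⟩
    · rw [hnone]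
      by_cases hx : x < 0
      · right
        refine ⟨x, xs.length, ?_, by simp, hx, ?_, ?_⟩
        · simp [List.foldl_cons, List.foldl_nil, pvStepNeg, hx]
        · intro z hz hz0
          rcases List.mem_append.mp hz with h | h
          · exact absurd (hall z h) (by omega)
          · simp at h; omega
        · refine PySem.List.index?_append_singleton_self xs x (fun hmem => ?_)
          exact absurd (hall x hmem) (by omega)
      · left
        constructor
        · intro z hz
          rcases List.mem_append.mp hz with h | h
          · exact hall z h
          · simp at h; omega
        · simp [List.foldl_cons, List.foldl_nil, pvStepNeg, hx]
    · rw [hfold]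
      by_cases hx : x < 0 ∧ v < x
      · right
        refine ⟨x, xs.length, ?_, by simp, hx.1, ?_, ?_⟩
        · simp [List.foldl_cons, List.foldl_nil, pvStepNeg, hx.1, hx.2]
        · intro z hz hz0
          rcases List.mem_append.mp hz with h | h
          · have := hvmax z h hz0; omega
          · simp at h; omega
        · refine PySem.List.index?_append_singleton_self xs x (fun hmem => ?_)
          have := hvmax x hmem hx.1; omega
      · right
        refine ⟨v, j, ?_, List.mem_append_left _ hvm, hv0, ?_, ?_⟩
        · rcases not_and_or.mp hx with h | h
          · simp [List.foldl_cons, List.foldl_nil, pvStepNeg, h]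
          · have hxv : ¬ v < x := h
            by_cases h2 : x < 0 <;> simp [List.foldl_cons, List.foldl_nil, pvStepNeg, h2, hxv]
        · intro z hz hz0
          rcases List.mem_append.mp hz with h | h
          · exact hvmax z h hz0
          · simp at h; subst h
            rcases not_and_or.mp hx with h | h
            · omega
            · omega
        · rw [PySem.List.index?_append_of_mem [x] hvm]
          exact hvi

-- B's nonnegative track: none iff no nonnegative element; else the maximal nonnegative element
lemma B_top (array : List Int) :
    ((∀ x ∈ array, x < 0) ∧ (PySem.List.enumerate array 0).foldl pvStepTop none = none) ∨
    (∃ (t : Int) (j : Nat), (PySem.List.enumerate array 0).foldl pvStepTop none = some (t, (j : Int)) ∧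
      t ∈ array ∧ 0 ≤ t ∧ (∀ x ∈ array, 0 ≤ x → x ≤ t) ∧
      PySem.List.index? array t = some j) := by
  induction array using List.reverseRecOn with
  | nil => left; simp [PySem.List.enumerate_nil]
  | append_singleton xs x ih =>
    rw [PySem.List.enumerate_append, List.foldl_append]
    have hsing : PySem.List.enumerate [x] ((0 : Int) + xs.length) = [((xs.length : Int), x)] := by
      simp [PySem.List.enumerate_cons, PySem.List.enumerate_nil]
    rw [hsing]
    rcases ih with ⟨hall, hnone⟩ | ⟨t, j, hfold, htm, ht0, htmax, hti⟩
    · rw [hnone]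
      by_cases hx : x < 0
      · left
        constructor
        · intro z hz
          rcases List.mem_append.mp hz with h | h
          · exact hall z h
          · simp at h; omega
        · simp [List.foldl_cons, List.foldl_nil, pvStepTop, hx]
      · right
        refine ⟨x, xs.length, ?_, by simp, by omega, ?_, ?_⟩
        · simp [List.foldl_cons, List.foldl_nil, pvStepTop, hx]
        · intro z hz hz0
          rcases List.mem_append.mp hz with h | h
          · exact absurd (hall z h) (by omega)
          · simp at h; omega
        · refine PySem.List.index?_append_singleton_self xs x (fun hmem => ?_)
          exact absurd (hall x hmem) (by omega)
    · rw [hfold]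
      by_cases hx : ¬ x < 0 ∧ t < x
      · right
        refine ⟨x, xs.length, ?_, by simp, by omega, ?_, ?_⟩
        · simp [List.foldl_cons, List.foldl_nil, pvStepTop, hx.1, hx.2]
        · intro z hz hz0
          rcases List.mem_append.mp hz with h | h
          · have := htmax z h hz0; omega
          · simp at h; omega
        · refine PySem.List.index?_append_singleton_self xs x (fun hmem => ?_)
          have := htmax x hmem (by omega); omega
      · right
        refine ⟨t, j, ?_, List.mem_append_left _ htm, ht0, ?_, ?_⟩
        · rcases not_and_or.mp hx with h | h
          · have h2 : x < 0 := not_not.mp h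
            simp [List.foldl_cons, List.foldl_nil, pvStepTop, h2]
          · have hxt : ¬ t < x := h
            by_cases h2 : x < 0 <;> simp [List.foldl_cons, List.foldl_nil, pvStepTop, h2, hxt]
        · intro z hz hz0
          rcases List.mem_append.mp hz with h | h
          · exact htmax z h hz0
          · simp at h; subst h
            rcases not_and_or.mp hx with h | h
            · omega
            · omega
        · rw [PySem.List.index?_append_of_mem [x] htm]
          exact hti

-- ===== VERDICT (by name: the statement is the Claim_ definition above) =====
theorem max_negative_number1_spec : Claim_equal_max_negative_number1 := by
  intro array hdom hpre
  show max_negative_number1 array = max_negative_number1_alt array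
  obtain ⟨j, hj, hva, hA⟩ := A_run array hdom hpre
  have hex : ∃ x ∈ array, 0 ≤ x := by
    rw [Pre_max_negative_number1, List.any_eq_true] at hpre
    simpa using hpre
  have hfold := foldl_pvStep (PySem.List.enumerate array 0) none none
  by_cases hneg : ∀ x ∈ array, 0 ≤ x
  · rcases B_neg array with ⟨_, h1⟩ | ⟨v, j1, _, hm, hv0, _, _⟩
    · rcases B_top array with ⟨hallneg, _⟩ | ⟨t, j2, h2, htm, ht0, htmax, hti⟩
      · obtain ⟨y, hy, hy0⟩ := hex
        exact absurd (hallneg y hy) (by omega)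
      · obtain ⟨hv0', hvmax'⟩ := A_pos array hpre hneg
        have htv : pvV array = t := le_antisymm (htmax _ hva hv0') (hvmax' _ htm)
        have hjj : j = j2 := by
          rw [htv] at hj
          rw [hj] at hti
          exact Option.some_inj.mp hti
        rw [hA, htv, hjj, max_negative_number1_alt, hfold, h1, h2]
        rfl
    · exact absurd (hneg _ hm) (by omega)
  · push_neg at hneg
    obtain ⟨y, hy, hy0⟩ := hneg
    obtain ⟨hv0', hvmax'⟩ := A_neg array hpre y hy hy0
    rcases B_neg array with ⟨hall, _⟩ | ⟨v', j', h1, hvm', hv0'', hvmax'', hvi'⟩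
    · exact absurd (hall y hy) (by omega)
    · have hvv : pvV array = v' := le_antisymm (hvmax'' _ hva hv0') (hvmax' _ hvm' hv0'')
      have hjj : j = j' := by
        rw [hvv] at hj
        rw [hj] at hvi'
        exact Option.some_inj.mp hvi'
      rw [hA, hvv, hjj, max_negative_number1_alt, hfold, h1]
      rfl
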